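-- pv_equiv track=rewrite | github.com/harshithadakarapu28/placement_python | SumOfEleOccurence_itoj.py | SumOfEle
-- ===== SOURCE A (Python) =====
-- def SumOfEle(n,i,j):
--     capture = False
--     total = 0
--     for num in n:
--         if num == i:
--             capture  = True
--         if capture:
--             total += num
--         if num == j:
--             break
--     return total
-- ===== SOURCE B (Python) =====
-- def SumOfEle(n, i, j):
--     if i not in n:
--         return 0
--     pi = n.index(i)
--     if j in n:
--         pj = n.index(j)
--         if pj < pi:
--             return 0
--         return sum(n[pi:pj + 1])
--     return sum(n[pi:])
-- ===== Notes on version B (the rewrite author's own statement) =====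
-- stated objective: idiomatic
-- what changed: Replaces the capture-flag single pass with index-finding (first occurrence of i and j) plus a slice-sum, reading directly as 'sum n[pi:pj+1]' with the j-before-i and no-j cases made explicit.
import Mathlib
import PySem

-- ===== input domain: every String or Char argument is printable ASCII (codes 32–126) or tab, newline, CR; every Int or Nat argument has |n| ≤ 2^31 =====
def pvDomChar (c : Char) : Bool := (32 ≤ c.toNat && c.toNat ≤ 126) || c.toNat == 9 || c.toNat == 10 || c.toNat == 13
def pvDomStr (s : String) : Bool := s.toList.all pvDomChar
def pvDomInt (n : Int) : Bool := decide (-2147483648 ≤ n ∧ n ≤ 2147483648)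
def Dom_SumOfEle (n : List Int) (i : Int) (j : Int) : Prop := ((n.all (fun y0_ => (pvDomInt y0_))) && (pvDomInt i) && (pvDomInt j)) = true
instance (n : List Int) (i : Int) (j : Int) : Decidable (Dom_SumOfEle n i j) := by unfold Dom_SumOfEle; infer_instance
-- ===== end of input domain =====

-- B replaces A's capture-flag single pass by index-finding plus a slice-sum (objective: idiomatic; same cost).

-- ===== PORT A =====
-- A's for-loop with `break`: structural recursion over the list carrying (capture, total).
def SumOfEleLoop (i j : Int) : List Int → Bool → Int → Int
  | [], _, total => total
  | num :: rest, capture, total =>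
    let capture' := if num == i then true else capture
    let total' := if capture' then total + num else total
    if num == j then total' else SumOfEleLoop i j rest capture' total'

def SumOfEle (n : List Int) (i : Int) (j : Int) : Int :=
  SumOfEleLoop i j n false 0

-- ===== PORT B =====
def SumOfEle_alt (n : List Int) (i : Int) (j : Int) : Int :=
  match PySem.List.index? n i with      -- `if i not in n: return 0` + `pi = n.index(i)`
  | none => 0
  | some pi =>
    match PySem.List.index? n j with    -- `if j in n: pj = n.index(j)`
    | some pj =>
      if pj < pi then 0
      else (PySem.List.slice n (some (pi : Int)) (some ((pj + 1 : Nat) : Int))).sum   -- sum(n[pi:pj+1])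
    | none => (PySem.List.slice n (some (pi : Int)) none).sum                          -- sum(n[pi:])

-- ===== PRECONDITION & SPEC =====
def Spec_SumOfEle (n : List Int) (i : Int) (j : Int) (out : Int) : Prop := out = SumOfEle_alt n i j
instance (n : List Int) (i : Int) (j : Int) (out : Int) : Decidable (Spec_SumOfEle n i j out) := by unfold Spec_SumOfEle; infer_instance

-- ===== CLAIM (what is proved, stated in full; the proofs are below) =====
def Claim_equal_SumOfEle : Prop := ∀ (n : List Int) (i : Int) (j : Int), Dom_SumOfEle n i j → Spec_SumOfEle n i j (SumOfEle n i j)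

-- ===== LEMMAS AND PROOFS =====

-- Proof-side characterisation: sum of the prefix up to and including the first j (whole list if absent).
def sumTo (j : Int) : List Int → Int
  | [] => 0
  | x :: xs => if x = j then x else x + sumTo j xs

theorem loop_captured (i j : Int) (xs : List Int) (t : Int) :
    SumOfEleLoop i j xs true t = t + sumTo j xs := by
  induction xs generalizing t with
  | nil => simp [SumOfEleLoop, sumTo]
  | cons x xs ih =>
    simp only [SumOfEleLoop, sumTo]
    by_cases hj : x = j <;> simp [hj, ih, add_assoc]

theorem sumTo_eq_index (j : Int) (xs : List Int) :
    sumTo j xs = (match PySem.List.index? xs j with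
      | none => xs.sum
      | some k => (xs.take (k + 1)).sum) := by
  induction xs with
  | nil => simp [sumTo]
  | cons x xs ih =>
    by_cases hj : x = j
    · subst hj
      rw [PySem.List.index?_cons_self]
      simp [sumTo]
    · rw [PySem.List.index?_cons_of_ne xs hj]
      simp only [sumTo, if_neg hj, ih]
      cases PySem.List.index? xs j <;> simp [List.take_succ_cons]

theorem main_eq (n : List Int) (i j : Int) : SumOfEle n i j = SumOfEle_alt n i j := by
  induction n with
  | nil => rfl
  | cons x xs ih =>
    by_cases hi : x = i
    · -- first element captures: A returns sumTo j (x::xs)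
      have hA : SumOfEle (x :: xs) i j = sumTo j (x :: xs) := by
        subst hi
        simp only [SumOfEle, SumOfEleLoop, sumTo]
        by_cases hj : x = j <;> simp [hj, loop_captured]
      rw [hA]
      unfold SumOfEle_alt
      rw [show PySem.List.index? (x :: xs) i = some 0 from hi ▸ PySem.List.index?_cons_self x xs]
      rw [sumTo_eq_index]
      cases hidx : PySem.List.index? (x :: xs) j with
      | none => simp
      | some k =>
        simp only []
        rw [if_neg (by omega : ¬ k < 0), PySem.List.slice_natCast]
        simp
    · -- first element is not i
      by_cases hj : x = j
      · -- break before capturing: A returns 0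
        have hij : ¬ j = i := fun h => hi (hj.trans h)
        have hA : SumOfEle (x :: xs) i j = 0 := by
          simp [SumOfEle, SumOfEleLoop, hj, hij]
        rw [hA]
        unfold SumOfEle_alt
        rw [PySem.List.index?_cons_of_ne xs hi,
            (hj ▸ PySem.List.index?_cons_self x xs : PySem.List.index? (x :: xs) j = some 0)]
        cases hmi : PySem.List.index? xs i <;> simp
      · -- x matches neither: A recurses; B's indices all shift by one
        have hA : SumOfEle (x :: xs) i j = SumOfEle xs i j := by
          simp [SumOfEle, SumOfEleLoop, hi, hj]
        rw [hA, ih]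
        unfold SumOfEle_alt
        rw [PySem.List.index?_cons_of_ne xs hi,
            PySem.List.index?_cons_of_ne xs hj]
        cases hmi : PySem.List.index? xs i with
        | none => simp
        | some pi =>
          simp only [Option.map_some]
          cases hmj : PySem.List.index? xs j with
          | none =>
            simp only [Option.map_none, PySem.List.slice_from_natCast,
              List.drop_succ_cons]
          | some pj =>
            simp only [Option.map_some]
            by_cases hlt : pj < pi
            · rw [if_pos hlt, if_pos (by omega : pj + 1 < pi + 1)]
            · rw [if_neg hlt, if_neg (by omega : ¬ pj + 1 < pi + 1)]
              rw [PySem.List.slice_natCast, PySem.List.slice_natCast,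
                List.drop_succ_cons,
                show pj + 1 + 1 - (pi + 1) = pj + 1 - pi from by omega]

-- ===== VERDICT (by name: the statement is the Claim_ definition above) =====
theorem SumOfEle_spec : Claim_equal_SumOfEle := by
  intro n i j _
  unfold Spec_SumOfEle
  exact main_eq n i j
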